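-- pv_equiv track=rewrite | github.com/pypi-data/pypi-mirror-121 | packages/TakeBlipInsightExtractor/TakeBlipInsightExtractor-0.0.3.tar.gz/TakeBlipInsightExtractor-0.0.3/TakeBlipInsightExtractor/visualization/csv_file.py | create_groups_column
-- ===== SOURCE A (Python) =====
-- def create_groups_column(entities_column, parent_entity_dict):
--     group_column = []
--     entity_parent_dict = {child: parent for parent, children_lst in
--                           parent_entity_dict.items() for child in
--                           children_lst}
--
--     for entities_list in entities_column:
--         temp_list = []
--         for entity_dict in entities_list:
--             entity_name = entity_dict['lowercase_value']
--             parent = entity_parent_dict[entity_name]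
--             temp_list.append(parent)
--         group_column.append(temp_list)
--     return group_column
-- ===== SOURCE B (Python) =====
-- def create_groups_column(entities_column, parent_entity_dict):
--     def parent_of(name):
--         return next(parent for parent, children in parent_entity_dict.items()
--                     if name in children)
--
--     return [[parent_of(entity_dict['lowercase_value'])
--              for entity_dict in entities_list]
--             for entities_list in entities_column]
-- ===== Notes on version B (the rewrite author's own statement) =====
-- stated objective: simpler
-- what changed: B drops A's precomputed child-to-parent reverse dictionary and instead finds, per entity, the first parent whose children list contains it; Pre_ excludes inputs where A raises KeyError (missing 'lowercase_value' key or an entity in no parent's list) and inputs where an entity belongs to several parents, on which A's last-key-wins dict-overwrite order vs B's first match are both accidental choices.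
-- outside the precondition, e.g. on create_groups_column([[{'lowercase_value': 'x'}]], {'p': ['x'], 'q': ['x']}): A returns [['q']], B returns [['p']]
import Mathlib
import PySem

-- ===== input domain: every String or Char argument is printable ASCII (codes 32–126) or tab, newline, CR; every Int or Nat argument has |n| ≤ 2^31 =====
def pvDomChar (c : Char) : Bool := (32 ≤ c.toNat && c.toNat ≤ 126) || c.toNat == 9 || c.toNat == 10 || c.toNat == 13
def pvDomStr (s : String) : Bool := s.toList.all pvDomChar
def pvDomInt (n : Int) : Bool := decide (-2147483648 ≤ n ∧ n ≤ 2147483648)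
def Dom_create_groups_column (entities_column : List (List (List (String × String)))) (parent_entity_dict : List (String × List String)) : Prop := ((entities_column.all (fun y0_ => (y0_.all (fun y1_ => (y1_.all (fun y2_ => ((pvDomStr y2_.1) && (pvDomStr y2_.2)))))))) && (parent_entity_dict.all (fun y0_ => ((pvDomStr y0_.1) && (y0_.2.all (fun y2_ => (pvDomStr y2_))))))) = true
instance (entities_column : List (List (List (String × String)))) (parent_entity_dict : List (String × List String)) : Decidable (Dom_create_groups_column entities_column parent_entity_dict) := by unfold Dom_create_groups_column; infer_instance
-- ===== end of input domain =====

-- B replaces A's precomputed child->parent reverse dictionary by a direct first-match scan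
-- of the parent items per entity (objective: simpler; no speed claim). Pre_ excludes inputs
-- where A raises KeyError and the duplicate-child corner where first vs last parent is accidental.


-- ===== PORT A =====
-- A: build entity_parent_dict = {child: parent for parent, children in parent_entity_dict.items() for child in children}
-- (later pairs overwrite earlier ones), then look each entity's 'lowercase_value' up in it.
-- The two dict subscripts raise KeyError in Python when the key is missing; those inputs are
-- excluded by Pre_ below, so the port uses getD "" there (exact on Pre_).
def create_groups_column (entities_column : List (List (List (String × String)))) (parent_entity_dict : List (String × List String)) : List (List String) :=
  let entity_parent_dict : PySem.Dict String String :=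
    (PySem.Dict.ofList parent_entity_dict).items.foldl
      (fun d pc => pc.2.foldl (fun d child => d.insert child pc.1) d) PySem.Dict.empty
  entities_column.foldl
    (fun group_column entities_list =>
      group_column ++
        [entities_list.foldl
          (fun temp_list entity_dict =>
            let entity_name := ((PySem.Dict.ofList entity_dict).get? "lowercase_value").getD ""
            temp_list ++ [entity_parent_dict.getD entity_name ""])
          []])
    []

-- ===== PORT B =====
-- B: per entity, next(parent for parent, children in parent_entity_dict.items() if name in children):
-- the FIRST parent whose children list contains the name ('next' raises StopIteration when none
-- does — outside Pre_; getD "" here, exact on Pre_).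
def create_groups_column_alt (entities_column : List (List (List (String × String)))) (parent_entity_dict : List (String × List String)) : List (List String) :=
  entities_column.map
    (fun entities_list =>
      entities_list.map
        (fun entity_dict =>
          let name := ((PySem.Dict.ofList entity_dict).get? "lowercase_value").getD ""
          (((PySem.Dict.ofList parent_entity_dict).items.find?
              (fun pc => decide (name ∈ pc.2))).map Prod.fst).getD ""))

-- ===== PRECONDITION & SPEC =====
-- Pre_ excludes the inputs where Python A raises KeyError (an entity_dict without the
-- 'lowercase_value' key, or a name in no parent's children list) and the inputs where a
-- referenced name lies in the children of MORE THAN ONE parent, on which A's value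
-- (dict-overwrite: last parent) and B's (first parent) are both accidental, defensible choices.
def Pre_create_groups_column (entities_column : List (List (List (String × String)))) (parent_entity_dict : List (String × List String)) : Prop :=
  (entities_column.all (fun entities_list =>
    entities_list.all (fun entity_dict =>
      ((PySem.Dict.ofList entity_dict).get? "lowercase_value").any (fun name =>
        ((PySem.Dict.ofList parent_entity_dict).items.countP
          (fun pc => decide (name ∈ pc.2))) == 1)))) = true
instance (entities_column : List (List (List (String × String)))) (parent_entity_dict : List (String × List String)) : Decidable (Pre_create_groups_column entities_column parent_entity_dict) := by unfold Pre_create_groups_column; infer_instance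

def pvWitness_create_groups_column : (List (List (List (String × String)))) × (List (String × List String)) :=
  ([[[("lowercase_value", "apple")], [("lowercase_value", "pear")]], [[("lowercase_value", "apple")]]],
   [("fruit", ["apple"]), ("tree", ["pear"])])

def Spec_create_groups_column (entities_column : List (List (List (String × String)))) (parent_entity_dict : List (String × List String)) (out : List (List String)) : Prop := out = create_groups_column_alt entities_column parent_entity_dict
instance (entities_column : List (List (List (String × String)))) (parent_entity_dict : List (String × List String)) (out : List (List String)) : Decidable (Spec_create_groups_column entities_column parent_entity_dict out) := by unfold Spec_create_groups_column; infer_instance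

-- ===== CLAIM (what is proved, stated in full; the proofs are below) =====
def Claim_equal_create_groups_column : Prop := ∀ (entities_column : List (List (List (String × String)))) (parent_entity_dict : List (String × List String)), Dom_create_groups_column entities_column parent_entity_dict → Pre_create_groups_column entities_column parent_entity_dict → Spec_create_groups_column entities_column parent_entity_dict (create_groups_column entities_column parent_entity_dict)

-- ===== LEMMAS AND PROOFS =====

-- Inserting every child of one parent, then looking a name up, is one membership test.
theorem pv_get?_foldl_insert_children (cs : List String) (p : String) (d : PySem.Dict String String) (name : String) :
    (cs.foldl (fun d child => d.insert child p) d).get? name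
      = if name ∈ cs then some p else d.get? name := by
  induction cs generalizing d with
  | nil => simp
  | cons c cs ih =>
    simp only [List.foldl_cons, ih, PySem.Dict.get?_insert, List.mem_cons]
    split_ifs <;> simp_all

-- A's reverse-dictionary lookup equals a last-match scan over the parent items.
theorem pv_reverse_eq_scan (pl : List (String × List String)) (d : PySem.Dict String String) (name : String) :
    (pl.foldl (fun d pc => pc.2.foldl (fun d child => d.insert child pc.1) d) d).get? name
      = pl.foldl (fun parent pc => if name ∈ pc.2 then some pc.1 else parent) (d.get? name) := by
  induction pl generalizing d with
  | nil => rfl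
  | cons pc pl ih =>
    simp only [List.foldl_cons, ih, pv_get?_foldl_insert_children]

-- A last-match scan over a list with no match keeps its accumulator.
theorem pv_scan_of_no_match (pl : List (String × List String)) (acc : Option String) (name : String)
    (h : ∀ pc ∈ pl, name ∉ pc.2) :
    pl.foldl (fun parent pc => if name ∈ pc.2 then some pc.1 else parent) acc = acc := by
  induction pl generalizing acc with
  | nil => rfl
  | cons pc pl ih =>
    simp only [List.foldl_cons]
    rw [if_neg (h pc (by simp))]
    exact ih acc (fun q hq => h q (by simp [hq]))

-- With EXACTLY ONE matching parent, the last-match scan equals the first match (find?).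
theorem pv_scan_eq_find (pl : List (String × List String)) (name : String)
    (h : pl.countP (fun pc => decide (name ∈ pc.2)) = 1) :
    pl.foldl (fun parent pc => if name ∈ pc.2 then some pc.1 else parent) none
      = (pl.find? (fun pc => decide (name ∈ pc.2))).map Prod.fst := by
  induction pl with
  | nil => simp at h
  | cons pc pl ih =>
    by_cases hm : name ∈ pc.2
    · have hrest : pl.countP (fun pc => decide (name ∈ pc.2)) = 0 := by
        rw [List.countP_cons_of_pos (by simpa using hm)] at h; omega
      have hno : ∀ q ∈ pl, name ∉ q.2 := by
        intro q hq hqm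
        have := (List.countP_pos_iff (p := fun pc => decide (name ∈ pc.2)) (l := pl)).mpr
          ⟨q, hq, by simpa using hqm⟩
        omega
      simp only [List.foldl_cons, if_pos hm]
      rw [pv_scan_of_no_match pl _ name hno, List.find?_cons_of_pos (by simpa using hm)]
      rfl
    · have h' : pl.countP (fun pc => decide (name ∈ pc.2)) = 1 := by
        rwa [List.countP_cons_of_neg (by simpa using hm)] at h
      simp only [List.foldl_cons, if_neg hm]
      rw [ih h', List.find?_cons_of_neg (by simpa using hm)]

-- ===== VERDICT (by name: the statement is the Claim_ definition above) =====
theorem create_groups_column_spec : Claim_equal_create_groups_column := by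
  intro entities_column parent_entity_dict _ hpre
  unfold Pre_create_groups_column at hpre
  rw [List.all_eq_true] at hpre
  unfold Spec_create_groups_column create_groups_column create_groups_column_alt
  rw [PySem.List.foldl_append_singleton_eq_map]
  simp only [List.nil_append]
  refine List.map_congr_left (fun entities_list hrow => ?_)
  have hrow' := hpre entities_list hrow
  rw [List.all_eq_true] at hrow'
  rw [PySem.List.foldl_append_singleton_eq_map]
  simp only [List.nil_append]
  refine List.map_congr_left (fun entity_dict hed => ?_)
  have hone := hrow' entity_dict hed
  rw [PySem.Dict.getD_eq_get?_getD, pv_reverse_eq_scan]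
  rw [PySem.Dict.get?_empty]
  cases hg : (PySem.Dict.ofList entity_dict).get? "lowercase_value" with
  | none => simp [hg] at hone
  | some name =>
    simp only [hg, Option.any_some, beq_iff_eq] at hone
    simp only [Option.getD_some]
    exact congrArg (fun o => Option.getD o "") (pv_scan_eq_find _ _ hone)
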